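-- pv_equiv track=rewrite | github.com/Lautarostuve/LexerPY | algoritmolexer.py | automataparentesis2
-- ===== SOURCE A (Python) =====
-- ESTADO_FINAL="Estado final"
--
-- ESTADO_TRAMPA="Estado trampa"
--
-- ESTADO_NO_FINAL="Estado aceptado"
--
-- def automataparentesis2(lexema):
--     estado = 0
--     estados_finales = [1]
--     for caracter in lexema:
--         if estado == 0 and caracter == ')':
--             estado = 1
--         else:
--             estado =-1
--             break
--
--     if estado == -1:
--         return ESTADO_TRAMPA
--     elif estado in estados_finales:
--         return ESTADO_FINAL
--     else:
--         return ESTADO_NO_FINAL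
-- ===== SOURCE B (Python) =====
-- ESTADO_FINAL = "Estado final"
-- ESTADO_TRAMPA = "Estado trampa"
-- ESTADO_NO_FINAL = "Estado aceptado"
--
-- def automataparentesis2(lexema):
--     caracteres = list(lexema)
--     if not caracteres:
--         return ESTADO_NO_FINAL
--     if caracteres == [')']:
--         return ESTADO_FINAL
--     return ESTADO_TRAMPA
-- ===== Notes on version B (the rewrite author's own statement) =====
-- stated objective: simpler
-- what changed: Replaced the state-machine loop over characters with a direct closed-form structural test (empty / exactly one ')' / anything else).
import Mathlib
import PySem

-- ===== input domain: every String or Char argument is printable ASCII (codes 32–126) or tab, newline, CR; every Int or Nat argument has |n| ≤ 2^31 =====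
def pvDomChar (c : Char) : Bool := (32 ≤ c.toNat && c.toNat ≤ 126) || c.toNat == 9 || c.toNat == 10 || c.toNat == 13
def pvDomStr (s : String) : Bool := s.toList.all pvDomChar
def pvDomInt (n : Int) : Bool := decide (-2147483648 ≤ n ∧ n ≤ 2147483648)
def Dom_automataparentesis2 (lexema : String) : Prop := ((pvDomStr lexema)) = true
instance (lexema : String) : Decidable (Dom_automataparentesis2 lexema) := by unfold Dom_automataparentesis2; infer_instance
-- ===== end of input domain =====

-- ===== PORT A =====
-- B replaces A's state-machine loop with a direct structural test; return values only.
def pvEstadoFinal : String := "Estado final"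
def pvEstadoTrampa : String := "Estado trampa"
def pvEstadoNoFinal : String := "Estado aceptado"

-- A's for-loop with break: state 0 starts; ')' in state 0 moves to 1, anything else sets -1 and breaks
def pvLoopA : Int → List Char → Int
  | estado, [] => estado
  | estado, c :: rest =>
    if estado == 0 && c == ')' then pvLoopA 1 rest
    else -1

def automataparentesis2 (lexema : String) : String :=
  let estado := pvLoopA 0 lexema.toList
  let estados_finales : List Int := [1]
  if estado == -1 then pvEstadoTrampa
  else if estados_finales.contains estado then pvEstadoFinal
  else pvEstadoNoFinal

-- ===== PORT B =====
def automataparentesis2_alt (lexema : String) : String :=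
  match lexema.toList with
  | [] => pvEstadoNoFinal
  | [')'] => pvEstadoFinal
  | _ => pvEstadoTrampa

-- ===== PRECONDITION & SPEC =====
def Spec_automataparentesis2 (lexema : String) (out : String) : Prop := out = automataparentesis2_alt lexema
instance (lexema : String) (out : String) : Decidable (Spec_automataparentesis2 lexema out) := by unfold Spec_automataparentesis2; infer_instance

-- ===== CLAIM (what is proved, stated in full; the proofs are below) =====
def Claim_equal_automataparentesis2 : Prop := ∀ (lexema : String), Dom_automataparentesis2 lexema → Spec_automataparentesis2 lexema (automataparentesis2 lexema)

-- ===== LEMMAS AND PROOFS =====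

-- ===== VERDICT (by name: the statement is the Claim_ definition above) =====
theorem automataparentesis2_spec : Claim_equal_automataparentesis2 := by
  intro lexema _
  unfold Spec_automataparentesis2 automataparentesis2 automataparentesis2_alt
  match h : lexema.toList with
  | [] => simp [pvLoopA]
  | [c] =>
    by_cases hc : c = ')' <;>
      simp [pvLoopA, hc, pvEstadoFinal, pvEstadoTrampa]
  | c :: d :: rest =>
    by_cases hc : c = ')' <;>
      simp [pvLoopA, hc, pvEstadoTrampa, pvEstadoNoFinal]
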